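-- pv_equiv track=rewrite | github.com/Abdelrhman-Hosny/regex-dfa-conversion | my_regex/minimization.py | get_inputs_and_non_acc_states
-- ===== SOURCE A (Python) =====
-- def get_inputs_and_non_acc_states(state_dict, accepting_states):
--
--     non_accepting_states = set()
--     dfa_inputs = set()
--     for state1, v in state_dict.items():
--         if state1 == "startingState":
--             continue
--         if state1 not in accepting_states:
--             non_accepting_states.add(state1)
--         for input_char, state2 in v.items():
--             if state2 not in accepting_states:
--                 non_accepting_states.add(state2)
--             if input_char not in dfa_inputs:
--                 dfa_inputs.add(input_char)
--
--     return non_accepting_states, dfa_inputs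
-- ===== SOURCE B (Python) =====
-- def get_inputs_and_non_acc_states(state_dict, accepting_states):
--     acc = set(accepting_states)
--
--     def solve(items):
--         if not items:
--             return set(), set()
--         if len(items) == 1:
--             state1, v = items[0]
--             if state1 == "startingState":
--                 return set(), set()
--             return {state1, *v.values()} - acc, set(v.keys())
--         mid = len(items) // 2
--         n1, i1 = solve(items[:mid])
--         n2, i2 = solve(items[mid:])
--         return n1 | n2, i1 | i2
--
--     return solve(list(state_dict.items()))
-- ===== Notes on version B (the rewrite author's own statement) =====
-- stated objective: alternative
-- what changed: Replaced A's single fused loop that grows both sets element-by-element under four conditionals with a divide-and-conquer recursion: the item list is split in half, each half solved recursively (a leaf builds its sets by set difference {state,*destinations} - accepting and set(keys)), and the halves are combined with set union.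
import Mathlib
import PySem

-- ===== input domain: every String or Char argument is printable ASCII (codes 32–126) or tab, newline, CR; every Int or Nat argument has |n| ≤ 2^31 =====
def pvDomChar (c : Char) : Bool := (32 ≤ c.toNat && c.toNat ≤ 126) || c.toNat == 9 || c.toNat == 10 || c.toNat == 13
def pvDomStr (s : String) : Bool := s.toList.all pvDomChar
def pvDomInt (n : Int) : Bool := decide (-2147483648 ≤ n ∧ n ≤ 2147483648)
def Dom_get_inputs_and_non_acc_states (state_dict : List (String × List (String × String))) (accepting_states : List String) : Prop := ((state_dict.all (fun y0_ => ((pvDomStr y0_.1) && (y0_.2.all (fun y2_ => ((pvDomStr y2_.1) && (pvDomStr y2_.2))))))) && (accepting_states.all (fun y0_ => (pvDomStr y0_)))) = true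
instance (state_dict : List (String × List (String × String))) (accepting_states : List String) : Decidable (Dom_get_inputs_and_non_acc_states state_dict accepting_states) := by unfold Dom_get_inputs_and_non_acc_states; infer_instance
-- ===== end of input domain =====

-- B replaces A's single fused loop (two sets grown element-by-element under four conditionals)
-- by a divide-and-conquer recursion combining half-solutions with set union (objective: alternative).
-- Both Pythons return a pair of sets; the ports return their element lists (compared as sets).

-- ===== PORT A =====
-- literal transliteration: one loop over state_dict, skipping "startingState",
-- conditionally adding state1, each destination state2, and each input_char.
def get_inputs_and_non_acc_states (state_dict : List (String × List (String × String))) (accepting_states : List String) : List String × List String :=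
  state_dict.foldl
    (fun (st : PySem.Set String × PySem.Set String) p =>
      if p.1 == "startingState" then st
      else
        p.2.foldl
          (fun (st2 : PySem.Set String × PySem.Set String) q =>
            (if q.2 ∈ accepting_states then st2.1 else PySem.Set.add st2.1 q.2,
             if PySem.Set.contains st2.2 q.1 then st2.2 else PySem.Set.add st2.2 q.1))
          ((if p.1 ∈ accepting_states then st.1 else PySem.Set.add st.1 p.1), st.2))
    (PySem.Set.empty, PySem.Set.empty)

-- ===== PORT B =====
-- B's recursive helper 'solve': empty → empty sets; singleton → leaf sets built by
-- set difference and set(keys); otherwise split at the midpoint, recurse, union.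
def pvSolve (acc : PySem.Set String) : List (String × List (String × String)) → PySem.Set String × PySem.Set String
  | [] => (PySem.Set.empty, PySem.Set.empty)
  | [p] =>
      if p.1 == "startingState" then (PySem.Set.empty, PySem.Set.empty)
      else (PySem.Set.diff (PySem.Set.ofList (p.1 :: p.2.map Prod.snd)) acc,
            PySem.Set.ofList (p.2.map Prod.fst))
  | p :: q :: rest =>
      let items := p :: q :: rest
      let mid := items.length / 2
      let l := pvSolve acc (items.take mid)
      let r := pvSolve acc (items.drop mid)
      (PySem.Set.union l.1 r.1, PySem.Set.union l.2 r.2)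
  termination_by items => items.length
  decreasing_by
  · simp [List.length_take]; omega
  · simp; omega

def get_inputs_and_non_acc_states_alt (state_dict : List (String × List (String × String))) (accepting_states : List String) : List String × List String :=
  pvSolve (PySem.Set.ofList accepting_states) state_dict

-- ===== PRECONDITION & SPEC =====
def Spec_get_inputs_and_non_acc_states (state_dict : List (String × List (String × String))) (accepting_states : List String) (out : List String × List String) : Prop := out = get_inputs_and_non_acc_states_alt state_dict accepting_states
instance (state_dict : List (String × List (String × String))) (accepting_states : List String) (out : List String × List String) : Decidable (Spec_get_inputs_and_non_acc_states state_dict accepting_states out) := by unfold Spec_get_inputs_and_non_acc_states; infer_instance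

-- ===== CLAIM =====
def Claim_equal_get_inputs_and_non_acc_states : Prop := ∀ (state_dict : List (String × List (String × String))) (accepting_states : List String), Dom_get_inputs_and_non_acc_states state_dict accepting_states → Spec_get_inputs_and_non_acc_states state_dict accepting_states (get_inputs_and_non_acc_states state_dict accepting_states)

-- ===== LEMMAS AND PROOFS =====

-- A's guarded add equals Set.add (the 'if x not in s' guard is what add does anyway).
lemma guarded_add_eq_add (s : PySem.Set String) (x : String) :
    (if x ∈ s then s else PySem.Set.add s x) = PySem.Set.add s x := by
  by_cases h : x ∈ s <;> simp [h, PySem.Set.add, PySem.Set.contains]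

-- A's inner transition loop, split into its two independent components.
lemma inner_loop (acc : List String) (v : List (String × String))
    (s1 s2 : PySem.Set String) :
    v.foldl
      (fun (st2 : PySem.Set String × PySem.Set String) q =>
        (if q.2 ∈ acc then st2.1 else PySem.Set.add st2.1 q.2,
         if PySem.Set.contains st2.2 q.1 then st2.2 else PySem.Set.add st2.2 q.1))
      (s1, s2)
      = (((v.map Prod.snd).filter (fun x => x ∉ acc)).foldl PySem.Set.add s1,
         (v.map Prod.fst).foldl PySem.Set.add s2) := by
  induction v generalizing s1 s2 with
  | nil => rfl
  | cons q t ih =>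
    rw [List.foldl_cons, ih]
    by_cases hq : q.2 ∈ acc <;> simp [hq, guarded_add_eq_add]

-- the non-accepting "stream" of a chunk of items, and its input stream
def pvStreamN (acc : List String) (sd : List (String × List (String × String))) : List String :=
  (((sd.filter (fun p => p.1 ≠ "startingState")).flatMap
      (fun p => p.1 :: p.2.map Prod.snd)).filter (fun x => x ∉ acc))

def pvStreamI (sd : List (String × List (String × String))) : List String :=
  (sd.filter (fun p => p.1 ≠ "startingState")).flatMap (fun p => p.2.map Prod.fst)

-- A's outer loop equals the ofList of the two streams.
lemma outer_loop (acc : List String) (sd : List (String × List (String × String)))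
    (s1 s2 : PySem.Set String) :
    sd.foldl
      (fun (st : PySem.Set String × PySem.Set String) p =>
        if p.1 == "startingState" then st
        else
          p.2.foldl
            (fun (st2 : PySem.Set String × PySem.Set String) q =>
              (if q.2 ∈ acc then st2.1 else PySem.Set.add st2.1 q.2,
               if PySem.Set.contains st2.2 q.1 then st2.2 else PySem.Set.add st2.2 q.1))
            ((if p.1 ∈ acc then st.1 else PySem.Set.add st.1 p.1), st.2))
      (s1, s2)
      = ((pvStreamN acc sd).foldl PySem.Set.add s1,
         (pvStreamI sd).foldl PySem.Set.add s2) := by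
  induction sd generalizing s1 s2 with
  | nil => rfl
  | cons p t ih =>
    rw [List.foldl_cons]
    by_cases hp : p.1 = "startingState"
    · rw [if_pos (by simp [hp]), ih]
      simp [pvStreamN, pvStreamI, hp]
    · rw [if_neg (by simp [hp]), inner_loop, ih]
      by_cases hin : p.1 ∈ acc <;>
        simp [pvStreamN, pvStreamI, hp, hin, List.filter_append, List.foldl_append]

-- ofList commutes with filter
lemma ofList_filter (p : String → Bool) (l : List String) :
    PySem.Set.ofList (l.filter p) = (PySem.Set.ofList l).filter p := by
  induction l with
  | nil => rfl
  | cons x xs ih =>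
    by_cases hx : p x = true
    · simp only [List.filter_cons, hx, if_pos, PySem.Set.ofList_cons, ih]
      simp [PySem.Set.discard, List.filter_filter, Bool.and_comm]
    · simp only [List.filter_cons, hx, PySem.Set.ofList_cons]
      simp only [Bool.false_eq_true, if_false]
      rw [ih]
      simp only [PySem.Set.discard, List.filter_filter]
      apply List.filter_congr
      intro a _
      by_cases hax : a = x <;> simp [hax, hx]

-- diff of ofList by a set is ofList of the filtered list
lemma diff_ofList (acc : PySem.Set String) (l : List String) :
    PySem.Set.diff (PySem.Set.ofList l) acc
      = PySem.Set.ofList (l.filter (fun x => !(PySem.Set.contains acc x))) := by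
  rw [ofList_filter]; rfl

-- left-biased union of ofLists is ofList of the concatenation
lemma union_ofList (xs ys : List String) :
    PySem.Set.union (PySem.Set.ofList xs) (PySem.Set.ofList ys)
      = PySem.Set.ofList (xs ++ ys) := by
  rw [PySem.Set.ofList_append]
  show PySem.Set.update _ (PySem.Set.ofList ys) = _
  rw [PySem.Set.update_eq_append_filter, PySem.Set.update_eq_append_filter,
    PySem.Set.ofList_ofList]

-- the non-accepting stream, filtered against a Set of accepting states
def pvStreamN' (acc : PySem.Set String) (sd : List (String × List (String × String))) : List String :=
  (((sd.filter (fun p => p.1 ≠ "startingState")).flatMap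
      (fun p => p.1 :: p.2.map Prod.snd)).filter (fun x => !(PySem.Set.contains acc x)))

-- the streams split over a chunk concatenation
lemma streamN'_append (acc : PySem.Set String) (a b : List (String × List (String × String))) :
    pvStreamN' acc (a ++ b) = pvStreamN' acc a ++ pvStreamN' acc b := by
  simp [pvStreamN', List.filter_append]

lemma streamI_append (a b : List (String × List (String × String))) :
    pvStreamI (a ++ b) = pvStreamI a ++ pvStreamI b := by
  simp [pvStreamI, List.filter_append]

-- B's recursion computes the ofList of the streams.
lemma pvSolve_eq (acc : PySem.Set String) (sd : List (String × List (String × String))) :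
    pvSolve acc sd
      = (PySem.Set.ofList (pvStreamN' acc sd), PySem.Set.ofList (pvStreamI sd)) := by
  fun_induction pvSolve acc sd with
  | case1 => rfl
  | case2 p hp =>
    have hp' : p.1 = "startingState" := by simpa using hp
    simp [pvStreamN', pvStreamI, hp']
  | case3 p hp =>
    have hp' : ¬ p.1 = "startingState" := by simpa using hp
    rw [show (PySem.Set.ofList (p.1 :: List.map Prod.snd p.2)).diff acc
          = PySem.Set.ofList ((p.1 :: List.map Prod.snd p.2).filter
              (fun x => !(PySem.Set.contains acc x))) from diff_ofList acc _]
    simp [pvStreamN', pvStreamI, hp']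
  | case4 p q rest items mid l r ih2 ih1 =>
    show ((pvSolve acc (List.take mid items)).1.union (pvSolve acc (List.drop mid items)).1,
          (pvSolve acc (List.take mid items)).2.union (pvSolve acc (List.drop mid items)).2) = _
    rw [ih2, ih1]
    have hsplit : items = items.take mid ++ items.drop mid := (List.take_append_drop mid items).symm
    conv_rhs => rw [show (p :: q :: rest) = items from rfl, hsplit, streamN'_append, streamI_append]
    rw [← union_ofList, ← union_ofList]

-- contains on ofList acc agrees with list membership
lemma filter_contains_eq (acc : List String) (l : List String) :
    l.filter (fun x => !(PySem.Set.contains (PySem.Set.ofList acc) x))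
      = l.filter (fun x => x ∉ acc) := by
  apply List.filter_congr
  intro a _
  by_cases ha : a ∈ acc <;> simp [ha, PySem.Set.mem_ofList]

-- ===== VERDICT =====
theorem get_inputs_and_non_acc_states_spec : Claim_equal_get_inputs_and_non_acc_states := by
  intro sd acc _
  show get_inputs_and_non_acc_states sd acc = get_inputs_and_non_acc_states_alt sd acc
  rw [get_inputs_and_non_acc_states, get_inputs_and_non_acc_states_alt, outer_loop, pvSolve_eq]
  rw [show pvStreamN' (PySem.Set.ofList acc) sd = pvStreamN acc sd from by
    simp only [pvStreamN', pvStreamN, filter_contains_eq]]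
  show (List.foldl PySem.Set.add PySem.Set.empty _, List.foldl PySem.Set.add PySem.Set.empty _) = _
  rw [show (PySem.Set.empty : PySem.Set String) = [] from rfl,
    ← PySem.Set.ofList_eq_foldl, ← PySem.Set.ofList_eq_foldl]
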